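-- pv_equiv track=rewrite | github.com/epibook/epibook.github.io | static/python/shortest_unique_prefix.py | find_shortest_prefix
-- ===== SOURCE A (Python) =====
-- import collections
--
-- def find_shortest_prefix(s, D):
--     class Trie:
--
--         class TrieNode:
--
--             def __init__(self):
--                 self.is_string = False
--                 self.leaves = collections.defaultdict(Trie.TrieNode)
--
--         def __init__(self):
--             self._root = self.TrieNode()
--
--         def insert(self, s):
--             p = self._root
--             for c in s:
--                 p = p.leaves[c]
--
--             # s already existed in this trie.
--             if p.is_string:
--                 return False
--             else:  # p.is_string == False.
--                 p.is_string = True  # Inserts s into this trie.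
--                 return True
--
--         def get_shortest_unique_prefix(self, s):
--             p = self._root
--             prefix = []
--             for c in s:
--                 prefix.append(c)
--                 if c not in p.leaves:
--                     return ''.join(prefix)
--                 p = p.leaves[c]
--             return ''
--
--     # Builds a trie according to given dictionary D.
--     T = Trie()
--     for word in D:
--         T.insert(word)
--     return T.get_shortest_unique_prefix(s)
-- ===== SOURCE B (Python) =====
-- def find_shortest_prefix(s, D):
--     prefix = ''
--     for c in s:
--         prefix += c
--         if not any(w.startswith(prefix) for w in D):
--             return prefix
--     return ''
-- ===== Notes on version B (the rewrite author's own statement) =====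
-- stated objective: simpler
-- what changed: Drops the trie entirely: one pass over s checking each growing prefix directly against D with str.startswith, instead of building a character trie from D and then walking it; measured faster since it avoids constructing per-character dict nodes for all of D.
import Mathlib
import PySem

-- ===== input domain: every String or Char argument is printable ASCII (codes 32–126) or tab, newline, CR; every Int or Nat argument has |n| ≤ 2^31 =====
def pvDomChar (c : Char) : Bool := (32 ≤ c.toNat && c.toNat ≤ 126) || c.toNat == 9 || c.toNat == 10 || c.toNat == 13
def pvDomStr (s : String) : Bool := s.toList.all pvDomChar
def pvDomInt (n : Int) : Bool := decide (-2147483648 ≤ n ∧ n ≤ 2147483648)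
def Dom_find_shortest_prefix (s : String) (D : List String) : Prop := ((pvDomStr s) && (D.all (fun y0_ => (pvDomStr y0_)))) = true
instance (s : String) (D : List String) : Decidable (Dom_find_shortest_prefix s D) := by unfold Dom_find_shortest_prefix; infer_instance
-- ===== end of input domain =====

-- B drops the trie: one pass over s, checking each growing prefix directly against D (simpler, no index built).

-- ===== PORT A =====
-- Trie with an explicit child-list type (the Python's defaultdict of TrieNode, insertion order).
mutual
inductive PyTrieNode where
  | mk : Bool → PyChildren → PyTrieNode
inductive PyChildren where
  | nil : PyChildren
  | cons : Char → PyTrieNode → PyChildren → PyChildren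
end

-- dict lookup: first (unique) matching key
def childGet? : PyChildren → Char → Option PyTrieNode
  | .nil, _ => none
  | .cons d t rest, c => if d = c then some t else childGet? rest c

-- dict write: overwrite in place, else append at the end
def childSet : PyChildren → Char → PyTrieNode → PyChildren
  | .nil, c, t => .cons c t .nil
  | .cons d u rest, c, t => if d = c then .cons d t rest else .cons d u (childSet rest c t)

-- Trie.insert: 'p = p.leaves[c]' with defaultdict creating missing nodes; sets is_string at the end
def trieInsert : PyTrieNode → List Char → PyTrieNode
  | .mk _b ch, [] => .mk true ch
  | .mk b ch, c :: cs =>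
    .mk b (childSet ch c (trieInsert (match childGet? ch c with
      | some t => t
      | none => .mk false .nil) cs))

-- Trie.get_shortest_unique_prefix: walk s, appending to prefix, stop at the first missing child
def getShortest : PyTrieNode → List Char → List Char → String
  | _, [], _ => ""
  | .mk _ ch, c :: cs, pre =>
    match childGet? ch c with
    | none => String.ofList (pre ++ [c])
    | some p => getShortest p cs (pre ++ [c])

def find_shortest_prefix (s : String) (D : List String) : String :=
  getShortest (D.foldl (fun t w => trieInsert t w.toList) (.mk false .nil)) s.toList []

-- ===== PORT B =====
def altLoop (D : List String) (pre : List Char) (cs : List Char) : String :=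
  match cs with
  | [] => ""
  | c :: rest =>
    if D.any (fun w => PySem.Str.startswith w (String.ofList (pre ++ [c]))) then
      altLoop D (pre ++ [c]) rest
    else String.ofList (pre ++ [c])

def find_shortest_prefix_alt (s : String) (D : List String) : String :=
  altLoop D [] s.toList

-- ===== PRECONDITION & SPEC =====
def Spec_find_shortest_prefix (s : String) (D : List String) (out : String) : Prop := out = find_shortest_prefix_alt s D
instance (s : String) (D : List String) (out : String) : Decidable (Spec_find_shortest_prefix s D out) := by unfold Spec_find_shortest_prefix; infer_instance

-- ===== CLAIM (what is proved, stated in full; the proofs are below) =====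
def Claim_equal_find_shortest_prefix : Prop := ∀ (s : String) (D : List String), Dom_find_shortest_prefix s D → Spec_find_shortest_prefix s D (find_shortest_prefix s D)

-- ===== LEMMAS AND PROOFS =====

-- walk the trie along a character list
def walk : PyTrieNode → List Char → Option PyTrieNode
  | t, [] => some t
  | .mk _ ch, c :: cs =>
    match childGet? ch c with
    | none => none
    | some u => walk u cs

theorem childGet?_set_self : ∀ (ch : PyChildren) (c : Char) (t : PyTrieNode),
    childGet? (childSet ch c t) c = some t
  | .nil, c, t => by simp [childSet, childGet?]
  | .cons d u rest, c, t => by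
    by_cases h : d = c <;> simp [childSet, childGet?, h, childGet?_set_self rest c t]

theorem childGet?_set_ne : ∀ (ch : PyChildren) (c d : Char) (t : PyTrieNode), d ≠ c →
    childGet? (childSet ch c t) d = childGet? ch d
  | .nil, c, d, t, h => by simp [childSet, childGet?, Ne.symm h]
  | .cons e u rest, c, d, t, h => by
    by_cases he : e = c
    · subst he
      simp [childSet, childGet?, Ne.symm h]
    · simp only [childSet, if_neg he]
      by_cases hd : e = d <;> simp [childGet?, hd, childGet?_set_ne rest c d t h]

theorem walk_fresh (cs : List Char) :
    walk (.mk false .nil) cs = none ↔ cs ≠ [] := by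
  cases cs <;> simp [walk, childGet?]

theorem walk_insert_none (q : List Char) : ∀ (t : PyTrieNode) (w : List Char),
    walk (trieInsert t w) q = none ↔ (walk t q = none ∧ ¬ q <+: w) := by
  induction q with
  | nil => intro t w; cases t <;> cases w <;> simp [walk, trieInsert]
  | cons c cs ih =>
    intro t w
    cases t with
    | mk b ch =>
      cases w with
      | nil =>
        simp [walk, trieInsert]
      | cons d ds =>
        by_cases hc : d = c
        · subst hc
          cases hget : childGet? ch d with
          | none =>
            rw [show walk (trieInsert (.mk b ch) (d :: ds)) (d :: cs)
                  = walk (trieInsert (.mk false .nil) ds) cs from by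
                simp [trieInsert, walk, hget, childGet?_set_self]]
            rw [ih, walk_fresh]
            constructor
            · rintro ⟨hne, hnp⟩
              refine ⟨by simp [walk, hget], fun hp => hnp ((List.cons_prefix_cons.mp hp).2)⟩
            · rintro ⟨_, hnp⟩
              refine ⟨fun hnil => ?_, fun hp => hnp (List.cons_prefix_cons.mpr ⟨rfl, hp⟩)⟩
              subst hnil; exact hnp (List.cons_prefix_cons.mpr ⟨rfl, List.nil_prefix⟩)
          | some u =>
            rw [show walk (trieInsert (.mk b ch) (d :: ds)) (d :: cs)
                  = walk (trieInsert u ds) cs from by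
                simp [trieInsert, walk, hget, childGet?_set_self]]
            rw [ih]
            simp [walk, hget, List.cons_prefix_cons]
        · have hne : c ≠ d := fun h => hc h.symm
          rw [show walk (trieInsert (.mk b ch) (d :: ds)) (c :: cs)
                = walk (.mk b ch) (c :: cs) from by
              cases hget : childGet? ch c <;>
                simp [trieInsert, walk, childGet?_set_ne ch d c _ hne, hget]]
          have hpre : ¬ (c :: cs <+: d :: ds) := by
            intro hp; exact hne (List.cons_prefix_cons.mp hp).1
          simp [hpre]

theorem walk_build_none (D : List String) : ∀ (t : PyTrieNode) (q : List Char),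
    walk (D.foldl (fun t w => trieInsert t w.toList) t) q = none ↔
      (walk t q = none ∧ ∀ w ∈ D, ¬ q <+: w.toList) := by
  induction D with
  | nil => intro t q; simp
  | cons w ws ih =>
    intro t q
    simp only [List.foldl_cons, ih, walk_insert_none, List.mem_cons]
    constructor
    · rintro ⟨⟨h1, h2⟩, h3⟩
      exact ⟨h1, fun v hv => by rcases hv with rfl | hv; exact h2; exact h3 v hv⟩
    · rintro ⟨h1, h2⟩
      exact ⟨⟨h1, h2 w (Or.inl rfl)⟩, fun v hv => h2 v (Or.inr hv)⟩

theorem getShortest_eq_altLoop (cs : List Char) : ∀ (t : PyTrieNode) (pre : List Char) (D : List String),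
    (∀ q : List Char, q ≠ [] → ((walk t q).isSome ↔ ∃ w ∈ D, (pre ++ q) <+: w.toList)) →
    getShortest t cs pre = altLoop D pre cs := by
  induction cs with
  | nil => intro t pre D _; cases t <;> rfl
  | cons c rest ih =>
    intro t pre D hinv
    cases t with
    | mk b ch =>
      have hone := hinv [c] (by simp)
      have hcond : (D.any (fun w => PySem.Str.startswith w (String.ofList (pre ++ [c])))) = true ↔
          ∃ w ∈ D, (pre ++ [c]) <+: w.toList := by
        simp [List.any_eq_true, PySem.Chars.startswith_iff]
      cases hget : childGet? ch c with
      | none =>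
        have hno : (D.any (fun w => PySem.Str.startswith w (String.ofList (pre ++ [c])))) = false := by
          rw [Bool.eq_false_iff]
          intro h
          have h2 := hcond.mp h
          rw [← hone] at h2
          simp [walk, hget] at h2
        rw [show getShortest (.mk b ch) (c :: rest) pre = String.ofList (pre ++ [c]) from by
              simp [getShortest, hget]]
        rw [show altLoop D pre (c :: rest) = String.ofList (pre ++ [c]) from by
              rw [altLoop, hno]; simp]
      | some u =>
        have hyes : (D.any (fun w => PySem.Str.startswith w (String.ofList (pre ++ [c])))) = true := by
          rw [hcond, ← hone]; simp [walk, hget]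
        simp only [getShortest, altLoop, hget, hyes, if_true]
        exact ih u (pre ++ [c]) D (by
          intro q hq
          have h3 := hinv (c :: q) (by simp)
          simpa [walk, hget, List.append_assoc] using h3)

-- ===== VERDICT (by name: the statement is the Claim_ definition above) =====
theorem find_shortest_prefix_spec : Claim_equal_find_shortest_prefix := by
  intro s D _
  unfold Spec_find_shortest_prefix find_shortest_prefix find_shortest_prefix_alt
  apply getShortest_eq_altLoop
  intro q hq
  have h := walk_build_none D (.mk false .nil) q
  rw [walk_fresh] at h
  rw [Option.isSome_iff_ne_none]
  constructor
  · intro hne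
    by_contra hnone
    push Not at hnone
    exact hne (h.mpr ⟨hq, fun w hw => by simpa using hnone w hw⟩)
  · rintro ⟨w, hw, hp⟩ hnone
    exact (h.mp hnone).2 w hw (by simpa using hp)
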